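-- pv_equiv track=rewrite | github.com/6KmG/webprog-projektem | Python/nummodgyak/gy0101.py | mantisszaForditas
-- ===== SOURCE A (Python) =====
-- def mantisszaForditas(mantissa: str) -> str:   # visszafordítja a mantissza számot szöveg típusú bináris számmá
--     fraction = ""
--     sign = mantissa[0]
--     exponent = ""
--     writeExponent = False
--     for i in range(2, len(mantissa)):
--         if mantissa[i] == '|':
--             writeExponent = True
--         if mantissa[i] == ']':
--             break
--
--         if not writeExponent:
--             fraction += mantissa[i]
--
--         if writeExponent:
--             exponent += mantissa[i]
--
--     exponent = exponent[1:]
--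
--     return (sign, fraction, exponent)
-- ===== SOURCE B (Python) =====
-- def mantisszaForditas(mantissa: str) -> str:   # locate-delimiters-then-slice via str.partition
--     sign = mantissa[0]
--     body = mantissa[2:].partition(']')[0]
--     fraction, _, exponent = body.partition('|')
--     return (sign, fraction, exponent)
-- ===== Notes on version B (the rewrite author's own statement) =====
-- stated objective: faster
-- what changed: replaces the per-character stateful loop (break flag, writeExponent flag, char-by-char string appends) with locate-delimiters-then-slice via str.partition, doing the scanning and copying in C-level primitives
import Mathlib
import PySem

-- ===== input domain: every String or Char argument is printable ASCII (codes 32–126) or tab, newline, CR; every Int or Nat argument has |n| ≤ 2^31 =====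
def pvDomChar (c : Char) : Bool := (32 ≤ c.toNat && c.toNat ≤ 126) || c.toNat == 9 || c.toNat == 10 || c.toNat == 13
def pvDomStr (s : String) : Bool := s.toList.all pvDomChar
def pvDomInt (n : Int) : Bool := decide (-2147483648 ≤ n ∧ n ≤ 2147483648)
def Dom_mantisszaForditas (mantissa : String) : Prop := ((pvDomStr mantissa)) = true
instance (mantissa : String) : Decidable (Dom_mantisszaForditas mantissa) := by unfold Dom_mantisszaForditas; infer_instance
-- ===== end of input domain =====

-- B replaces A's stateful per-character loop by partition-based slicing; return values agree on all nonempty inputs (both raise IndexError on "").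
-- ===== PORT A =====
-- A's for-loop over range(2, len) with the writeExponent flag and the ']' break,
-- as structural recursion over the same suffix of characters with the same state.
def mfLoopA : List Char → Bool → List Char × List Char
  | [], _ => ([], [])
  | c :: rest, we =>
    let we' := if c = '|' then true else we
    if c = ']' then ([], [])
    else
      let fe := mfLoopA rest we'
      (if !we' then c :: fe.1 else fe.1, if we' then c :: fe.2 else fe.2)

def mantisszaForditas (mantissa : String) : String × String × String :=
  let cs := mantissa.toList
  let sign := match PySem.List.pyGet? cs 0 with   -- mantissa[0]; none = IndexError, excluded by Pre_
    | some c => String.mk [c]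
    | none => ""
  let fe := mfLoopA (cs.drop 2) false            -- for i in range(2, len(mantissa)) reads exactly these chars
  (sign, String.mk fe.1, String.mk (fe.2.drop 1))  -- exponent = exponent[1:]

-- ===== PORT B =====
def mantisszaForditas_alt (mantissa : String) : String × String × String :=
  let sign := match PySem.List.pyGet? mantissa.toList 0 with   -- mantissa[0]
    | some c => String.mk [c]
    | none => ""
  let body := (mantissa.toList.drop 2).takeWhile (· ≠ ']')     -- mantissa[2:].partition(']')[0]
  let p := body.span (· ≠ '|')                                 -- body.partition('|') : p.1 = before, p.2 = sep ++ after
  (sign, String.mk p.1, String.mk (p.2.drop 1))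

-- ===== PRECONDITION & SPEC =====
-- Pre_ excludes only the empty string, on which Python A raises IndexError at mantissa[0].
def Pre_mantisszaForditas (mantissa : String) : Prop := mantissa ≠ ""
instance (mantissa : String) : Decidable (Pre_mantisszaForditas mantissa) := by unfold Pre_mantisszaForditas; infer_instance
def pvWitness_mantisszaForditas : String := "+[101|011]"

def Spec_mantisszaForditas (mantissa : String) (out : String × String × String) : Prop := out = mantisszaForditas_alt mantissa
instance (mantissa : String) (out : String × String × String) : Decidable (Spec_mantisszaForditas mantissa out) := by unfold Spec_mantisszaForditas; infer_instance

-- ===== CLAIM (what is proved, stated in full; the proofs are below) =====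
def Claim_equal_mantisszaForditas : Prop := ∀ (mantissa : String), Dom_mantisszaForditas mantissa → Pre_mantisszaForditas mantissa → Spec_mantisszaForditas mantissa (mantisszaForditas mantissa)

-- ===== LEMMAS AND PROOFS =====

-- Once writeExponent is true, the fraction stays empty and the exponent collects everything up to ']'.
theorem mfLoopA_true (bs : List Char) : mfLoopA bs true = ([], bs.takeWhile (· ≠ ']')) := by
  induction bs with
  | nil => rfl
  | cons c rest ih =>
    by_cases hc : c = ']'
    · subst hc; simp [mfLoopA, List.takeWhile]
    · simp [mfLoopA, List.takeWhile, hc, ih]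

-- A's loop from the initial state computes: truncate at ']', then split at the first '|'.
theorem mfLoopA_false (bs : List Char) :
    mfLoopA bs false =
      ((bs.takeWhile (· ≠ ']')).takeWhile (· ≠ '|'),
       (bs.takeWhile (· ≠ ']')).dropWhile (· ≠ '|')) := by
  induction bs with
  | nil => rfl
  | cons c rest ih =>
    by_cases hb : c = ']'
    · subst hb; simp [mfLoopA, List.takeWhile]
    · by_cases hp : c = '|'
      · subst hp
        simp [mfLoopA, List.takeWhile, mfLoopA_true]
      · simp [mfLoopA, List.takeWhile, hb, hp, ih]

-- ===== VERDICT (by name: the statement is the Claim_ definition above) =====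
theorem mantisszaForditas_spec : Claim_equal_mantisszaForditas := by
  intro mantissa _ _
  unfold Spec_mantisszaForditas mantisszaForditas mantisszaForditas_alt
  simp only [mfLoopA_false, List.span_eq_takeWhile_dropWhile]
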